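-- pv_equiv track=rewrite | github.com/PlasmaIntec/Python-Theater | handleInput.py | removeNewline
-- ===== SOURCE A (Python) =====
-- def removeNewline(List): # removes newlines from List
--     temp = []
--     num = []
--     for i in List:
--         if i != '\n':
--             num.append(i)
--         else:
--             temp.append(int(''.join(num)))
--             num = []
--     return temp
-- ===== SOURCE B (Python) =====
-- def removeNewline(List): # removes newlines from List
--     idxs = [i for i, x in enumerate(List) if x == '\n']
--     out = []
--     start = 0
--     for idx in idxs:
--         out.append(int(''.join(List[start:idx])))
--         start = idx + 1
--     return out
-- ===== Notes on version B (the rewrite author's own statement) =====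
-- stated objective: alternative
-- what changed: B first builds a table of newline positions (enumerate+filter) and then converts each slice List[start:idx] via join+int with a running start pointer, instead of A's single pass that appends characters one at a time into an accumulator and flushes it at each newline.
import Mathlib
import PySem

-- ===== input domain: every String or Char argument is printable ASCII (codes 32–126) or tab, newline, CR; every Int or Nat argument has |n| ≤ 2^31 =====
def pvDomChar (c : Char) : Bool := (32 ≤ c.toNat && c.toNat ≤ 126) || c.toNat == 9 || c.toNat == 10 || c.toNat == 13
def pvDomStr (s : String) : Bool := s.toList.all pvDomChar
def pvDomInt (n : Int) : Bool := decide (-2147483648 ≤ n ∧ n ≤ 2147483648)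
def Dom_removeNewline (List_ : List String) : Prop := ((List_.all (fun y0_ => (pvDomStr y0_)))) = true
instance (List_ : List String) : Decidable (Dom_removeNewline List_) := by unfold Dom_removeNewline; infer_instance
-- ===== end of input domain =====

-- B cuts the list at a precomputed table of newline positions (index scan, then slice-and-convert)
-- instead of A's element-by-element accumulator; objective: alternative decomposition, same linear cost.

-- int(''.join(seg)); total form of Python's int() — Pre_ guarantees ofChars? is some on every converted segment.
def pvJoinInt (xs : List String) : Int :=
  (PySem.Int.ofChars? (xs.flatMap String.toList)).getD 0

-- ===== PORT A =====
-- one step of A's loop body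
def pvAStep (st : List Int × List String) (i : String) : List Int × List String :=
  if i ≠ "\n" then (st.1, st.2 ++ [i]) else (st.1 ++ [pvJoinInt st.2], [])

def removeNewline (List_ : List String) : List Int :=
  (List_.foldl pvAStep ([], [])).1

-- ===== PORT B =====
-- [i for i, x in enumerate(List) if x == '\n'] as a counting recursion
def pvNlIdx : List String → Int → List Int
  | [], _ => []
  | x :: l, k => if x = "\n" then k :: pvNlIdx l (k + 1) else pvNlIdx l (k + 1)

-- one step of B's loop body: state (out, start)
def pvBStep (L : List String) (st : List Int × Int) (idx : Int) : List Int × Int :=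
  (st.1 ++ [pvJoinInt (PySem.List.slice L (some st.2) (some idx))], idx + 1)

def removeNewline_alt (List_ : List String) : List Int :=
  ((pvNlIdx List_ 0).foldl (pvBStep List_) ([], 0)).1

-- ===== PRECONDITION & SPEC =====
-- Python A raises ValueError when the segment before some newline does not parse as an int
-- (e.g. adjacent newlines give int('')); Pre_ admits exactly the inputs where every such segment parses.
def Pre_removeNewline (List_ : List String) : Prop :=
  ∀ seg ∈ (List_.splitOn "\n").dropLast,
    (PySem.Int.ofChars? (seg.flatMap String.toList)).isSome = true
instance (List_ : List String) : Decidable (Pre_removeNewline List_) := by unfold Pre_removeNewline; infer_instance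

def pvWitness_removeNewline : List String := ["1", "2", "\n", " -3 ", "\n", "9"]

def Spec_removeNewline (List_ : List String) (out : List Int) : Prop := out = removeNewline_alt List_
instance (List_ : List String) (out : List Int) : Decidable (Spec_removeNewline List_ out) := by unfold Spec_removeNewline; infer_instance

-- ===== CLAIM (what is proved, stated in full; the proofs are below) =====
def Claim_equal_removeNewline : Prop := ∀ (List_ : List String), Dom_removeNewline List_ → Pre_removeNewline List_ → Spec_removeNewline List_ (removeNewline List_)

-- ===== LEMMAS AND PROOFS =====

-- common characterisation: process l with pending characters num
def pvS : List String → List String → List Int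
  | [], _ => []
  | x :: l, num => if x = "\n" then pvJoinInt num :: pvS l [] else pvS l (num ++ [x])

lemma pvS_no_nl (l : List String) (num : List String) (h : "\n" ∉ l) : pvS l num = [] := by
  induction l generalizing num with
  | nil => rfl
  | cons x t ih =>
    simp only [List.mem_cons, not_or] at h
    simp [pvS, Ne.symm h.1, ih _ h.2]

lemma pvS_split (pre rest num : List String) (h : "\n" ∉ pre) :
    pvS (pre ++ "\n" :: rest) num = pvJoinInt (num ++ pre) :: pvS rest [] := by
  induction pre generalizing num with
  | nil => simp [pvS]
  | cons x t ih =>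
    simp only [List.mem_cons, not_or] at h
    simp [pvS, Ne.symm h.1, ih _ h.2]

lemma pvNlIdx_no_nl (l : List String) (k : Int) (h : "\n" ∉ l) : pvNlIdx l k = [] := by
  induction l generalizing k with
  | nil => rfl
  | cons x t ih =>
    simp only [List.mem_cons, not_or] at h
    simp [pvNlIdx, Ne.symm h.1, ih _ h.2]

lemma pvNlIdx_split (pre rest : List String) (k : Int) (h : "\n" ∉ pre) :
    pvNlIdx (pre ++ "\n" :: rest) k
      = (k + pre.length) :: pvNlIdx rest (k + pre.length + 1) := by
  induction pre generalizing k with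
  | nil => simp [pvNlIdx]
  | cons x t ih =>
    simp only [List.mem_cons, not_or] at h
    simp only [List.cons_append, pvNlIdx, if_neg (Ne.symm h.1), ih _ h.2, List.length_cons]
    push_cast
    congr 1
    · ring
    · congr 1
      ring

lemma pvFirst_split (l : List String) (h : "\n" ∈ l) :
    ∃ pre rest, l = pre ++ "\n" :: rest ∧ "\n" ∉ pre := by
  induction l with
  | nil => cases h
  | cons x t ih =>
    by_cases hx : x = "\n"
    · exact ⟨[], t, by simp [hx], by simp⟩
    · have hm : "\n" ∈ t := by
        rcases List.mem_cons.mp h with h1 | h1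
        · exact absurd h1.symm hx
        · exact h1
      rcases ih hm with ⟨p, r, he, hp⟩
      refine ⟨x :: p, r, by simp [he], ?_⟩
      simp only [List.mem_cons, not_or]
      exact ⟨fun e => hx e.symm, hp⟩

lemma pvA_eq (l : List String) (temp : List Int) (num : List String) :
    (l.foldl pvAStep (temp, num)).1 = temp ++ pvS l num := by
  induction l generalizing temp num with
  | nil => simp [pvS]
  | cons x t ih =>
    by_cases hx : x = "\n"
    · rw [List.foldl_cons, show pvAStep (temp, num) x = (temp ++ [pvJoinInt num], []) by
          simp [pvAStep, hx], ih]
      simp [pvS, hx]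
    · rw [List.foldl_cons, show pvAStep (temp, num) x = (temp, num ++ [x]) by
          simp [pvAStep, hx], ih]
      simp [pvS, hx]

lemma pvB_loop (L : List String) (suffix taken : List String) (acc : List Int)
    (hL : L = taken ++ suffix) :
    ((pvNlIdx suffix (taken.length : Int)).foldl (pvBStep L) (acc, (taken.length : Int))).1
      = acc ++ pvS suffix [] := by
  induction hn : suffix.length using Nat.strong_induction_on generalizing suffix taken acc with
  | _ n ih =>
  by_cases hmem : "\n" ∈ suffix
  · rcases pvFirst_split suffix hmem with ⟨pre, rest, he, hp⟩
    subst he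
    rw [pvNlIdx_split pre rest _ hp, List.foldl_cons]
    have hslice : PySem.List.slice L (some (taken.length : Int))
        (some ((taken.length : Int) + (pre.length : Int))) = pre := by
      rw [PySem.List.slice_natCast_add, hL, List.drop_left]
      simp
    have hstep : pvBStep L (acc, (taken.length : Int)) ((taken.length : Int) + pre.length)
        = (acc ++ [pvJoinInt pre], (taken.length : Int) + pre.length + 1) := by
      rw [pvBStep, hslice]
    rw [hstep]
    have hlen : ((taken ++ pre ++ ["\n"]).length : Int)
        = (taken.length : Int) + pre.length + 1 := by simp; ring
    have hrec := ih rest.length (by subst hn; simp only [List.length_append, List.length_cons]; omega) rest (taken ++ pre ++ ["\n"])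
        (acc ++ [pvJoinInt pre]) (by simp [hL]) rfl
    rw [hlen] at hrec
    rw [hrec, pvS_split pre rest [] hp]
    simp
  · rw [pvNlIdx_no_nl _ _ hmem, pvS_no_nl _ _ hmem]
    simp

-- ===== VERDICT (by name: the statement is the Claim_ definition above) =====
theorem removeNewline_spec : Claim_equal_removeNewline := by
  intro L _ _
  unfold Spec_removeNewline removeNewline removeNewline_alt
  rw [pvA_eq]
  have := pvB_loop L L [] [] (by simp)
  simpa using this.symm
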